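-- pv_equiv track=rewrite | github.com/mattporritt/agentic_indexer | src/moodle_indexer/agent_safety.py | _component_root_for_path
-- ===== SOURCE A (Python) =====
-- def _component_root_for_path(path: str) -> str:
--     """Return the component-root prefix for one Moodle path."""
--
--     parts = [part for part in path.split("/") if part]
--     if len(parts) >= 3 and parts[:2] == ["admin", "tool"]:
--         return "/".join(parts[:3])
--     if len(parts) >= 3 and parts[:2] == ["ai", "provider"]:
--         return "/".join(parts[:3])
--     if len(parts) >= 2 and parts[0] in {"mod", "block", "local", "theme", "enrol", "report", "question", "course", "admin"}:
--         return "/".join(parts[:2])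
--     return parts[0] if parts else path
-- ===== SOURCE B (Python) =====
-- # Recursive longest-match descent over a prefix trie instead of an if-ladder of prefix rules.
-- _TRIE = {
--     "admin": {"": 2, "tool": {"": 3}},
--     "ai": {"provider": {"": 3}},
--     "mod": {"": 2},
--     "block": {"": 2},
--     "local": {"": 2},
--     "theme": {"": 2},
--     "enrol": {"": 2},
--     "report": {"": 2},
--     "question": {"": 2},
--     "course": {"": 2},
-- }
--
--
-- def _best_depth(node, parts, total):
--     """Deepest trie-marked depth matching a prefix of parts and not exceeding total; 0 if none."""
--     if not parts:
--         return 0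
--     child = node.get(parts[0])
--     if child is None:
--         return 0
--     deeper = _best_depth(child, parts[1:], total)
--     if deeper:
--         return deeper
--     d = child.get("")
--     if isinstance(d, int) and d <= total:
--         return d
--     return 0
--
--
-- def _component_root_for_path(path: str) -> str:
--     """Return the component-root prefix for one Moodle path."""
--
--     parts = [part for part in path.split("/") if part]
--     if not parts:
--         return path
--     return "/".join(parts[: _best_depth(_TRIE, parts, len(parts)) or 1])
-- ===== Notes on version B (the rewrite author's own statement) =====
-- stated objective: alternative
-- what changed: Replaces the if-ladder of prefix rules by a prefix trie (nested dict) walked with a recursive longest-match descent that returns the deepest marked depth, then joins that many components.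
import Mathlib
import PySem

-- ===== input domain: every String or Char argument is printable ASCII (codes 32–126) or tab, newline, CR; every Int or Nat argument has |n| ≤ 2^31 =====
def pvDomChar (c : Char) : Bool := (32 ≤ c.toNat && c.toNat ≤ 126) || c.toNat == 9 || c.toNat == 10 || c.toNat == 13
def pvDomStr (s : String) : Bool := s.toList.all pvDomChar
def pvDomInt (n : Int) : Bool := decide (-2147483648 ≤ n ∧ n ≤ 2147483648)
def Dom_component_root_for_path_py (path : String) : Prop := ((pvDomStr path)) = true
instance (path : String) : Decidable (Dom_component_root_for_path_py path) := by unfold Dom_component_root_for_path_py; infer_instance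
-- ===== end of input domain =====

-- B replaces A's if-ladder of prefix rules by a recursive longest-match descent over a prefix trie; same return values.

-- ===== PORT A =====
-- parts = [part for part in path.split("/") if part]; "/" ≠ "" so split? is always some (getD [] never taken).
-- parts.headD "" ports parts[0] under the short-circuit 'len(parts) >= 2 and …' ("" is not in the set, so the default never fires).
def component_root_for_path_py (path : String) : String :=
  let parts := ((PySem.Str.split? path "/").getD []).filter (fun p => p ≠ "")
  if 3 ≤ parts.length ∧ parts.take 2 = ["admin", "tool"] then PySem.Str.join "/" (parts.take 3)
  else if 3 ≤ parts.length ∧ parts.take 2 = ["ai", "provider"] then PySem.Str.join "/" (parts.take 3)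
  else if 2 ≤ parts.length ∧ parts.headD "" ∈ ["mod", "block", "local", "theme", "enrol", "report", "question", "course", "admin"] then PySem.Str.join "/" (parts.take 2)
  else match parts with
    | p :: _ => p
    | [] => path

-- ===== PORT B =====
-- Source B's nested-dict trie as an explicit mutual inductive (a nested 'List (String × PvTrie)' child
-- field is not allowed); the stop depth stored under key "" becomes the Option Nat field, the
-- remaining keys become the children association list, looked up in order like dict.get.
mutual
inductive PvTrie where
  | node : Option Nat → PvChildren → PvTrie
inductive PvChildren where
  | nil : PvChildren
  | cons : String → PvTrie → PvChildren → PvChildren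
end

-- node.get(parts[0]) on the children association list
def pvChildGet : PvChildren → String → Option PvTrie
  | .nil, _ => none
  | .cons k t rest, s => if s = k then some t else pvChildGet rest s

def pvTrie : PvTrie :=
  .node none
    (.cons "admin" (.node (some 2) (.cons "tool" (.node (some 3) .nil) .nil))
    (.cons "ai" (.node none (.cons "provider" (.node (some 3) .nil) .nil))
    (.cons "mod" (.node (some 2) .nil)
    (.cons "block" (.node (some 2) .nil)
    (.cons "local" (.node (some 2) .nil)
    (.cons "theme" (.node (some 2) .nil)
    (.cons "enrol" (.node (some 2) .nil)
    (.cons "report" (.node (some 2) .nil)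
    (.cons "question" (.node (some 2) .nil)
    (.cons "course" (.node (some 2) .nil) .nil))))))))))

-- Source B's _best_depth: deepest trie-marked depth matching a prefix of parts and <= total; 0 if none.
def pvBestDepth (node : PvTrie) (parts : List String) (total : Nat) : Nat :=
  match parts, node with
  | [], _ => 0
  | p :: rest, .node _ ch =>
    match pvChildGet ch p with
    | none => 0
    | some child =>
      let deeper := pvBestDepth child rest total
      if deeper ≠ 0 then deeper
      else match child with
        | .node (some d) _ => if d ≤ total then d else 0
        | .node none _ => 0

def component_root_for_path_py_alt (path : String) : String :=
  let parts := ((PySem.Str.split? path "/").getD []).filter (fun p => p ≠ "")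
  match parts with
  | [] => path
  | _ =>
    let d := pvBestDepth pvTrie parts parts.length
    PySem.Str.join "/" (parts.take (if d = 0 then 1 else d))

-- ===== PRECONDITION & SPEC =====
def Spec_component_root_for_path_py (path : String) (out : String) : Prop := out = component_root_for_path_py_alt path
instance (path : String) (out : String) : Decidable (Spec_component_root_for_path_py path out) := by unfold Spec_component_root_for_path_py; infer_instance

-- ===== CLAIM (what is proved, stated in full; the proofs are below) =====
def Claim_equal_component_root_for_path_py : Prop := ∀ (path : String), Dom_component_root_for_path_py path → Spec_component_root_for_path_py path (component_root_for_path_py path)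

-- ===== LEMMAS AND PROOFS =====

-- joining a single part is that part
theorem pv_join_one (a : String) : PySem.Str.join "/" [a] = a := by
  simp [PySem.Str.join]

-- a trie node without children never contributes a depth
theorem pv_bd_leaf (d : Option Nat) (rest : List String) (total : Nat) :
    pvBestDepth (.node d .nil) rest total = 0 := by
  cases rest <;> simp [pvBestDepth, pvChildGet]

-- full characterisation of Source B's _best_depth on the concrete trie
theorem pv_bd_top (a : String) (rest : List String) (total : Nat) :
    pvBestDepth pvTrie (a :: rest) total =
      if a = "admin" then
        (if rest.head? = some "tool" ∧ 3 ≤ total then 3 else if 2 ≤ total then 2 else 0)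
      else if a = "ai" then
        (if rest.head? = some "provider" ∧ 3 ≤ total then 3 else 0)
      else if a ∈ (["mod", "block", "local", "theme", "enrol", "report", "question", "course"] : List String) then
        (if 2 ≤ total then 2 else 0)
      else 0 := by
  by_cases ha : a = "admin"
  · subst ha
    cases rest with
    | nil => simp [pvTrie, pvBestDepth, pvChildGet]
    | cons b r =>
      by_cases hb : b = "tool"
      · subst hb
        by_cases h3 : 3 ≤ total <;>
          simp [pvTrie, pvBestDepth, pvChildGet, pv_bd_leaf, h3]
      · simp [pvTrie, pvBestDepth, pvChildGet, hb]
  · by_cases hai : a = "ai"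
    · subst hai
      cases rest with
      | nil => simp [pvTrie, pvBestDepth, pvChildGet, ha]
      | cons b r =>
        by_cases hb : b = "provider"
        · subst hb
          by_cases h3 : 3 ≤ total <;>
            simp [pvTrie, pvBestDepth, pvChildGet, pv_bd_leaf, ha, h3]
        · simp [pvTrie, pvBestDepth, pvChildGet, ha, hb]
    · by_cases hm : a ∈ (["mod", "block", "local", "theme", "enrol", "report", "question", "course"] : List String)
      · simp only [List.mem_cons, List.not_mem_nil, or_false] at hm
        rcases hm with rfl | rfl | rfl | rfl | rfl | rfl | rfl | rfl <;>
          simp [pvTrie, pvBestDepth, pvChildGet, pv_bd_leaf]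
      · simp only [List.mem_cons, List.not_mem_nil, or_false, not_or] at hm
        obtain ⟨h1, h2, h3, h4, h5, h6, h7, h8⟩ := hm
        simp [pvTrie, pvBestDepth, pvChildGet, ha, hai, h1, h2, h3, h4, h5, h6, h7, h8]

-- the two programs agree for ANY list of parts
theorem pv_core_eq (parts : List String) (path : String) :
    (if 3 ≤ parts.length ∧ parts.take 2 = ["admin", "tool"] then PySem.Str.join "/" (parts.take 3)
     else if 3 ≤ parts.length ∧ parts.take 2 = ["ai", "provider"] then PySem.Str.join "/" (parts.take 3)
     else if 2 ≤ parts.length ∧ parts.headD "" ∈ ["mod", "block", "local", "theme", "enrol", "report", "question", "course", "admin"] then PySem.Str.join "/" (parts.take 2)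
     else match parts with
       | p :: _ => p
       | [] => path) =
    (match parts with
     | [] => path
     | _ =>
       let d := pvBestDepth pvTrie parts parts.length
       PySem.Str.join "/" (parts.take (if d = 0 then 1 else d))) := by
  match parts with
  | [] => rfl
  | [a] =>
      simp only [pv_bd_top, List.head?, List.length_cons, List.length_nil, List.take_succ_cons,
        List.take_nil, List.headD_cons, List.mem_cons, List.not_mem_nil, or_false]
      norm_num [pv_join_one]
  | [a, b] =>
      simp only [pv_bd_top, List.head?, List.length_cons, List.length_nil, List.take_succ_cons,
        List.take_nil, List.headD_cons, List.mem_cons, List.not_mem_nil, or_false,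
        List.cons.injEq, and_true, Option.some.injEq]
      norm_num
      split_ifs <;> simp_all [pv_join_one]
  | a :: b :: c :: r =>
      simp only [pv_bd_top, List.head?, List.length_cons, List.take_succ_cons, List.take_zero,
        List.headD_cons, List.mem_cons, List.not_mem_nil, or_false, List.cons.injEq, and_true,
        Option.some.injEq, Nat.le_add_left]
      norm_num [Nat.le_add_left]
      split_ifs <;> simp_all [pv_join_one]

-- ===== VERDICT (by name: the statement is the Claim_ definition above) =====
theorem component_root_for_path_py_spec : Claim_equal_component_root_for_path_py := by
  intro path _
  unfold Spec_component_root_for_path_py component_root_for_path_py component_root_for_path_py_alt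
  exact pv_core_eq _ path
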